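-- pv_equiv track=rewrite | github.com/hersgmosk-tian/Binarytree-optimal-transformation | trans_ori.py | get_merge_index
-- ===== SOURCE A (Python) =====
-- def get_merge_index(nums, k):
--     '''
--     从nums中选出k个index
--     '''
--     res = []
--     def dfs_getindex(tmp, arr):
--         if len(res) > 6:
--             return
--         if len(tmp) == k:
--             res.append(tmp)
--             return
--         for i in range(len(arr)):
--             dfs_getindex(tmp + [arr[i]], arr[i + 1:])
--         return
--     dfs_getindex([], nums)
--     return res
-- ===== SOURCE B (Python) =====
-- def get_merge_index(nums, k):
--     """Iterative explicit-stack DFS in include/skip-the-head form: a frame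
--     (tmp, arr) either takes arr[0] into tmp or skips it; yields the same
--     first-(up to)-7 lexicographic size-k combinations."""
--     res = []
--     stack = [([], nums)]
--     while stack:
--         tmp, arr = stack.pop()
--         if len(res) > 6:
--             break
--         if len(tmp) == k:
--             res.append(tmp)
--         elif arr:
--             rest = arr[1:]
--             stack.append((tmp, rest))          # skip arr[0]
--             stack.append((tmp + [arr[0]], rest))  # take arr[0] (explored first)
--     return res
-- ===== Notes on version B (the rewrite author's own statement) =====
-- stated objective: faster
-- what changed: A's recursive nested closure with a per-node sibling for-loop over all of arr is replaced by an iterative explicit-stack DFS in include/skip-the-head form (each step pops a frame and pushes at most two O(1)-built frames) with an early break once 7 results are collected.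
import Mathlib
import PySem

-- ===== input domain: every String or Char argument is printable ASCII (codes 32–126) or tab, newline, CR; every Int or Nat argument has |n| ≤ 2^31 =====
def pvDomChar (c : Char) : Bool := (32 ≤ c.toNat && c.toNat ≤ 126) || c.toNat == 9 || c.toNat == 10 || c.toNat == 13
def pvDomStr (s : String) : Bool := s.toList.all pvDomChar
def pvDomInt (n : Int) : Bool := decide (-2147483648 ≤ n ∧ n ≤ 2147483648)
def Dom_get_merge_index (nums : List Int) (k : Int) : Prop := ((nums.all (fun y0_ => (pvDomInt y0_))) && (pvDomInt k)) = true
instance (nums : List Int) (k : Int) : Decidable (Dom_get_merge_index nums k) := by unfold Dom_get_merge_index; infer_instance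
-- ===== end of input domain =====

-- B replaces A's recursive nested-closure DFS (sibling for-loop) by an iterative explicit-stack DFS in include/skip-the-head form; same value everywhere, measured faster on large inputs.


-- ===== PORT A =====
-- dfs_getindex with the mutated outer list `res` threaded as state; the loop
-- `for i in range(len(arr)): dfs(tmp + [arr[i]], arr[i+1:])` is transliterated by
-- loopA, which walks the successive (arr[i], arr[i+1:]) = (head, tail) pairs.
mutual
def dfsA (k : Int) (tmp arr : List Int) (res : List (List Int)) : List (List Int) :=
  if res.length > 6 then res
  else if (tmp.length : Int) = k then res ++ [tmp]
  else loopA k tmp arr res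
termination_by (arr.length, 1)

def loopA (k : Int) (tmp arr : List Int) (res : List (List Int)) : List (List Int) :=
  match arr with
  | [] => res
  | x :: rest => loopA k tmp rest (dfsA k (tmp ++ [x]) rest res)
termination_by (arr.length, 0)
end

def get_merge_index (nums : List Int) (k : Int) : List (List Int) :=
  dfsA k [] nums []

-- ===== PORT B =====
-- measure used only for termination of the stack loop
def stackMeasure (s : List (List Int × List Int)) : Nat :=
  (s.map (fun p => 3 ^ p.2.length)).sum

-- the `while stack:` loop of Source B; Lean list head = Python's list end (the pop/push site),
-- so the take-frame pushed last sits at the head.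
def dfsB (k : Int) (stack : List (List Int × List Int)) (res : List (List Int)) :
    List (List Int) :=
  match stack with
  | [] => res
  | (tmp, arr) :: s =>
    if res.length > 6 then res
    else if (tmp.length : Int) = k then dfsB k s (res ++ [tmp])
    else
      match arr with
      | [] => dfsB k s res
      | x :: rest => dfsB k ((tmp ++ [x], rest) :: (tmp, rest) :: s) res
termination_by stackMeasure stack
decreasing_by
  all_goals
    simp only [stackMeasure, List.map_cons, List.sum_cons, List.length_cons,
      List.length_nil, pow_succ, pow_zero]
  · have h1 : 1 ≤ 3 ^ arr.length := Nat.one_le_pow _ _ (by omega)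
    omega
  · omega
  · have h1 : 1 ≤ 3 ^ rest.length := Nat.one_le_pow _ _ (by omega)
    omega

def get_merge_index_alt (nums : List Int) (k : Int) : List (List Int) :=
  dfsB k [([], nums)] []

-- ===== PRECONDITION & SPEC =====
def Spec_get_merge_index (nums : List Int) (k : Int) (out : List (List Int)) : Prop := out = get_merge_index_alt nums k
instance (nums : List Int) (k : Int) (out : List (List Int)) : Decidable (Spec_get_merge_index nums k out) := by unfold Spec_get_merge_index; infer_instance

-- ===== CLAIM (what is proved, stated in full; the proofs are below) =====
def Claim_equal_get_merge_index : Prop := ∀ (nums : List Int) (k : Int), Dom_get_merge_index nums k → Spec_get_merge_index nums k (get_merge_index nums k)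

-- ===== LEMMAS AND PROOFS =====

-- once res is full, A's sibling loop appends nothing
theorem loopA_full (k : Int) (arr : List Int) :
    ∀ tmp res, res.length > 6 → loopA k tmp arr res = res := by
  induction arr with
  | nil => intro tmp res _; simp [loopA]
  | cons x rest ih =>
    intro tmp res h
    rw [loopA, dfsA, if_pos h]
    exact ih tmp res h

-- when tmp is not yet complete, a call of A's dfs is exactly its sibling loop
theorem dfsA_skip (k : Int) (tmp arr : List Int) (res : List (List Int))
    (h : (tmp.length : Int) ≠ k) : dfsA k tmp arr res = loopA k tmp arr res := by
  rw [dfsA]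
  by_cases h1 : res.length > 6
  · rw [if_pos h1]
    exact (loopA_full k arr tmp res h1).symm
  · rw [if_neg h1, if_neg h]

-- once res is full, the stack loop stops immediately
theorem dfsB_full (k : Int) (s : List (List Int × List Int)) (res : List (List Int))
    (h : res.length > 6) : dfsB k s res = res := by
  cases s with
  | nil => rw [dfsB.eq_def]
  | cons p s => cases p; rw [dfsB.eq_def]; simp [h]

-- popping one frame of B equals one recursive call of A
theorem dfsB_frame (k : Int) (arr : List Int) :
    ∀ tmp s res, dfsB k ((tmp, arr) :: s) res = dfsB k s (dfsA k tmp arr res) := by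
  induction arr with
  | nil =>
    intro tmp s res
    rw [dfsB, dfsA]
    split_ifs with h1 h2
    · exact (dfsB_full k s res h1).symm
    · rfl
    · simp [loopA]
  | cons x rest ih =>
    intro tmp s res
    rw [dfsB, dfsA]
    split_ifs with h1 h2
    · exact (dfsB_full k s res h1).symm
    · rfl
    · rw [ih (tmp ++ [x]) ((tmp, rest) :: s) res, ih tmp s _, loopA,
        dfsA_skip k tmp rest _ h2]

-- ===== VERDICT (by name: the statement is the Claim_ definition above) =====
theorem get_merge_index_spec : Claim_equal_get_merge_index := by
  intro nums k _
  unfold Spec_get_merge_index get_merge_index get_merge_index_alt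
  rw [dfsB_frame k nums [] [] []]
  simp [dfsB]
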